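-- pv_equiv track=rewrite | github.com/pabloschwarzenberg/grader | tema4_ej3/tema4_ej3_2502703be7d33ba3653353a5fb49482c.py | traducir_a_jerigonzo
-- ===== SOURCE A (Python) =====
-- def traducir_a_jerigonzo(texto):
--     resultado = ""
--     for letra in texto:
--         if letra.lower() in "aeiouáéíóú":
--             resultado += letra + "p" + letra.lower()
--         else:
--             resultado += letra
--     return resultado
-- ===== SOURCE B (Python) =====
-- import re
--
-- def traducir_a_jerigonzo(texto):
--     return re.sub(
--         "[aeiou\u00e1\u00e9\u00ed\u00f3\u00fa]",
--         lambda m: m.group() + "p" + m.group().lower(),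
--         texto,
--         flags=re.IGNORECASE,
--     )
-- ===== Notes on version B (the rewrite author's own statement) =====
-- stated objective: idiomatic
-- what changed: Replaces the explicit character loop with string accumulation by a single re.sub over the case-insensitive vowel character class, with a callback that appends the echo syllable (the letter p followed by the lowercased matched vowel) after each match.
import Mathlib
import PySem

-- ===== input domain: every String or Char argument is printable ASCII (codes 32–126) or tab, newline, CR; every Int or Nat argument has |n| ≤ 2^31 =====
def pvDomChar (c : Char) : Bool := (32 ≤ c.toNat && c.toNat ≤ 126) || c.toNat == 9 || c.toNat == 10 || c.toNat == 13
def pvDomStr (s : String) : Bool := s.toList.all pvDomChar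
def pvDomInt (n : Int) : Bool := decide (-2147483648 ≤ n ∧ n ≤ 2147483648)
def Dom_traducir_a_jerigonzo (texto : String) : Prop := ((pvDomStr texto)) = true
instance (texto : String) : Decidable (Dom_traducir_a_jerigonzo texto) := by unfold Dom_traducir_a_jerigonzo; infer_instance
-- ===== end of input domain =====

-- B replaces A's explicit loop-with-string-accumulator by a single regex substitution
-- (re.sub over the case-insensitive vowel class, callback match + "p" + match.lower()); idiomatic, same values.

-- ===== PORT A =====
-- A's loop: ranges over the characters, accumulates 'resultado'; strings handled as Char lists,
-- 'letra.lower() in "aeiouáéíóú"' is single-char membership in that string.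
def traducir_a_jerigonzo (texto : String) : String :=
  String.mk (texto.toList.foldl
    (fun resultado letra =>
      if "aeiouáéíóú".toList.contains (PySem.Chars.lowerChar letra) then
        resultado ++ [letra, 'p', PySem.Chars.lowerChar letra]
      else
        resultado ++ [letra])
    [])

-- ===== PORT B =====
-- re.sub with a single-character class is a per-character substitution: each (case-insensitively)
-- matched vowel m is replaced by m + "p" + m.lower(); every other character is kept unchanged.
def pvJeringozoSub (c : Char) : List Char :=
  if "aeiouáéíóú".toList.contains (PySem.Chars.lowerChar c) then
    [c, 'p', PySem.Chars.lowerChar c]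
  else
    [c]

def traducir_a_jerigonzo_alt (texto : String) : String :=
  String.mk (texto.toList.flatMap pvJeringozoSub)

-- ===== PRECONDITION & SPEC =====
def Spec_traducir_a_jerigonzo (texto : String) (out : String) : Prop := out = traducir_a_jerigonzo_alt texto
instance (texto : String) (out : String) : Decidable (Spec_traducir_a_jerigonzo texto out) := by unfold Spec_traducir_a_jerigonzo; infer_instance

-- ===== CLAIM (what is proved, stated in full; the proofs are below) =====
def Claim_equal_traducir_a_jerigonzo : Prop := ∀ (texto : String), Dom_traducir_a_jerigonzo texto → Spec_traducir_a_jerigonzo texto (traducir_a_jerigonzo texto)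

-- ===== LEMMAS AND PROOFS =====
theorem pv_foldl_eq_flatMap (l acc : List Char) :
    (l.foldl
      (fun resultado letra =>
        if "aeiouáéíóú".toList.contains (PySem.Chars.lowerChar letra) then
          resultado ++ [letra, 'p', PySem.Chars.lowerChar letra]
        else
          resultado ++ [letra])
      acc) = acc ++ l.flatMap pvJeringozoSub := by
  induction l generalizing acc with
  | nil => simp
  | cons c t ih =>
    simp only [List.foldl_cons, List.flatMap_cons, ih, pvJeringozoSub]
    split_ifs <;> simp

-- ===== VERDICT (by name: the statement is the Claim_ definition above) =====
theorem traducir_a_jerigonzo_spec : Claim_equal_traducir_a_jerigonzo := by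
  intro texto _
  unfold Spec_traducir_a_jerigonzo traducir_a_jerigonzo traducir_a_jerigonzo_alt
  rw [pv_foldl_eq_flatMap]
  simp
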